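-- pv_equiv track=rewrite | github.com/Tanvi129/Arduino | FindPort.py | findArduino
-- ===== SOURCE A (Python) =====
-- def findArduino(portFound):
--     comport="None"
--     numConnection=len(portFound)
--
--     for i in range(numConnection):
--         port=portFound[i]
--         strport=str(port)
--         if "Arduino" in strport:
--             splitPort=strport.split(" ")
--             comport=splitPort[0]
--
--     return comport
-- ===== SOURCE B (Python) =====
-- def findArduino(portFound):
--     for port in reversed(portFound):
--         strport = str(port)
--         if "Arduino" in strport:
--             return strport.split(" ")[0]
--     return "None"
-- ===== Notes on version B (the rewrite author's own statement) =====
-- stated objective: simpler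
-- what changed: Replaces the full forward scan with an overwrite-keep-last accumulator by a reverse scan that returns at the first match (equal to A's last forward match), dropping the accumulator.
import Mathlib
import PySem

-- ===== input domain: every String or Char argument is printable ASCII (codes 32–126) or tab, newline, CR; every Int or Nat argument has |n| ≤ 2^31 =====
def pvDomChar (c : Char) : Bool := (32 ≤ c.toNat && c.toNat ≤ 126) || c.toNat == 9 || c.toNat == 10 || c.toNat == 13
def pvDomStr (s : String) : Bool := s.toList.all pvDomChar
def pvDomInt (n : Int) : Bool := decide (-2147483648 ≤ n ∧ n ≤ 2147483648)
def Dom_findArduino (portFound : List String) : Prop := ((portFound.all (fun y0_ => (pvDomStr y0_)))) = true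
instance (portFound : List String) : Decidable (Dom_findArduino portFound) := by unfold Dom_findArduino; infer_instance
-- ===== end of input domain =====

-- B replaces A's forward scan with keep-last accumulator by a reverse scan returning the first match (simpler decomposition).


-- ===== PORT A =====
-- str(port) on a str is identity; splitPort[0] cannot fail (split with " " is nonempty), ported as headD "".
def findArduino (portFound : List String) : String :=
  portFound.foldl
    (fun comport port =>
      if PySem.Str.isIn "Arduino" port then
        (((PySem.Str.split? port " ").getD []).headD "")
      else comport)
    "None"

-- ===== PORT B =====
def findArduinoRev : List String → String
  | [] => "None"
  | port :: rest =>
    if PySem.Str.isIn "Arduino" port then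
      (((PySem.Str.split? port " ").getD []).headD "")
    else findArduinoRev rest

def findArduino_alt (portFound : List String) : String :=
  findArduinoRev portFound.reverse

-- ===== PRECONDITION & SPEC =====
def Spec_findArduino (portFound : List String) (out : String) : Prop := out = findArduino_alt portFound
instance (portFound : List String) (out : String) : Decidable (Spec_findArduino portFound out) := by unfold Spec_findArduino; infer_instance

-- ===== CLAIM (what is proved, stated in full; the proofs are below) =====
def Claim_equal_findArduino : Prop := ∀ (portFound : List String), Dom_findArduino portFound → Spec_findArduino portFound (findArduino portFound)

-- ===== LEMMAS AND PROOFS =====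

theorem findArduinoRev_of_no_match (l : List String)
    (h : ∀ p ∈ l, PySem.Str.isIn "Arduino" p = false) : findArduinoRev l = "None" := by
  induction l with
  | nil => rfl
  | cons p rest ih =>
    simp only [findArduinoRev, h p (List.mem_cons_self ..)]
    exact ih (fun q hq => h q (List.mem_cons_of_mem _ hq))

theorem foldl_eq_rev (l : List String) (c : String) :
    l.foldl
      (fun comport port =>
        if PySem.Str.isIn "Arduino" port then
          (((PySem.Str.split? port " ").getD []).headD "")
        else comport) c
    = if l.any (fun p => PySem.Str.isIn "Arduino" p) then findArduinoRev l.reverse else c := by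
  induction l using List.reverseRecOn generalizing c with
  | nil => simp
  | append_singleton l p ih =>
    rw [List.foldl_append]
    simp only [List.foldl_cons, List.foldl_nil, List.reverse_append, List.reverse_singleton,
      List.singleton_append, findArduinoRev, List.any_append, List.any_cons, List.any_nil]
    by_cases hp : PySem.Str.isIn "Arduino" p = true
    · rw [hp]; simp only [Bool.or_false, Bool.or_true, if_true]
    · simp only [Bool.not_eq_true] at hp
      rw [hp, ih]
      simp only [Bool.or_false, Bool.false_eq_true, if_false]

-- ===== VERDICT (by name: the statement is the Claim_ definition above) =====
theorem findArduino_spec : Claim_equal_findArduino := by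
  intro l _
  unfold Spec_findArduino findArduino findArduino_alt
  rw [foldl_eq_rev]
  by_cases h : l.any (fun p => PySem.Str.isIn "Arduino" p) = true
  · rw [if_pos h]
  · rw [if_neg h, findArduinoRev_of_no_match]
    intro p hp
    simp only [List.any_eq_true, not_exists, not_and] at h
    exact Bool.not_eq_true _ ▸ h p (List.mem_reverse.mp hp)
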